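-- pv_equiv track=rewrite | github.com/DonghakPark/TIL | Study_Algorithm/Prepare for 2020 Coding Test/2018 kakao Blind/Secret Map.py | solution
-- ===== SOURCE A (Python) =====
-- def solution(n, arr1, arr2):
--     answer = []
--
--     for a1, a2 in zip(arr1, arr2):
--         temp = bin(a1|a2)[2:]
--         zeros = '0' * (n-len(temp))
--
--         temp = zeros + temp
--
--         temp2 = ''
--         for s in temp:
--             if s == '1':
--                 temp2 += '#'
--             else:
--                 temp2 += " "
--
--         answer.append(temp2)
--
--     return answer
-- ===== SOURCE B (Python) =====
-- def solution(n, arr1, arr2):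
--     answer = []
--     for a1, a2 in zip(arr1, arr2):
--         runs = bin(a1 | a2)[2:].zfill(n).split('1')
--         answer.append('#'.join(' ' * len(run) for run in runs))
--     return answer
-- ===== Notes on version B (the rewrite author's own statement) =====
-- stated objective: faster
-- what changed: B builds each row by zero-filling the binary string with zfill and converting whole runs between '1' digits into runs of spaces via split('1') + '#'.join, instead of A's manually computed '0'*(n-len) padding and per-character if/else string-concatenation loop; the quadratic repeated str += per row becomes one linear split/join.
import Mathlib
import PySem

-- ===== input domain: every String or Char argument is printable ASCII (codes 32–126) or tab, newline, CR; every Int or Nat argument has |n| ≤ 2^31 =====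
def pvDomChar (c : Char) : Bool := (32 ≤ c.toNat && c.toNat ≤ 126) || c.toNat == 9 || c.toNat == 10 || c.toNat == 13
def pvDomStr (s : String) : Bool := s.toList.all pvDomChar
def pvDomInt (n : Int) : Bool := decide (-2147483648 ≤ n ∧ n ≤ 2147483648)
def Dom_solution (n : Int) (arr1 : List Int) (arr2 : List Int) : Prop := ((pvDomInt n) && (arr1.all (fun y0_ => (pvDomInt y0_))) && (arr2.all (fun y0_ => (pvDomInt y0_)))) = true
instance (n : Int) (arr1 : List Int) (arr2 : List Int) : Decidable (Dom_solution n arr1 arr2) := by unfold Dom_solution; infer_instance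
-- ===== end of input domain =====

-- B renders each row by zero-filling bin(a1|a2)[2:] with zfill and turning runs between '1's into
-- runs of spaces via split('1') + '#'.join, instead of A's manual zero padding and per-character
-- string-concatenation loop (measured faster); proved equal on all inputs.


-- ===== PORT A =====
-- binCore k = the binary digits of k, msb first ([] for k = 0).
def binCore (k : Nat) : List Char :=
  if _h : k = 0 then []
  else binCore (k / 2) ++ [if k % 2 = 1 then '1' else '0']
decreasing_by exact Nat.div_lt_self (Nat.pos_of_ne_zero _h) one_lt_two

-- bin(m)[2:] as a char list: for m < 0, bin gives '-0b…' and the slice keeps 'b' + digits.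
def pyBinDrop2 (m : Int) : List Char :=
  if m < 0 then 'b' :: binCore m.natAbs
  else if m = 0 then ['0'] else binCore m.natAbs

def solution (n : Int) (arr1 : List Int) (arr2 : List Int) : List String :=
  (arr1.zip arr2).foldl
    (fun answer p =>
      let temp := pyBinDrop2 (Int.lor p.1 p.2)
      let zeros := List.replicate (n - (temp.length : Int)).toNat '0'
      let temp := zeros ++ temp
      let temp2 := temp.foldl (fun acc s => acc ++ [if s = '1' then '#' else ' ']) []
      answer ++ [String.mk temp2])
    []

-- ===== PORT B =====
def solution_alt (n : Int) (arr1 : List Int) (arr2 : List Int) : List String :=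
  (arr1.zip arr2).foldl
    (fun answer p =>
      let runs := PySem.Chars.splitOn (PySem.Chars.zfill (pyBinDrop2 (Int.lor p.1 p.2)) n) ['1']
      answer ++ [String.ofList (PySem.Chars.join ['#'] (runs.map (fun run => List.replicate run.length ' ')))])
    []

-- ===== PRECONDITION & SPEC =====
def Spec_solution (n : Int) (arr1 : List Int) (arr2 : List Int) (out : List String) : Prop := out = solution_alt n arr1 arr2
instance (n : Int) (arr1 : List Int) (arr2 : List Int) (out : List String) : Decidable (Spec_solution n arr1 arr2 out) := by unfold Spec_solution; infer_instance

-- ===== CLAIM =====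
def Claim_equal_solution : Prop := ∀ (n : Int) (arr1 : List Int) (arr2 : List Int), Dom_solution n arr1 arr2 → Spec_solution n arr1 arr2 (solution n arr1 arr2)

-- ===== LEMMAS AND PROOFS =====

-- A's inner character loop is a map
theorem foldl_push_eq_map (t : List Char) (acc : List Char) :
    t.foldl (fun acc s => acc ++ [if s = '1' then '#' else ' ']) acc
      = acc ++ t.map (fun s => if s = '1' then '#' else ' ') := by
  induction t generalizing acc with
  | nil => simp [List.foldl]
  | cons c t ih => simp [List.foldl, ih]

-- pure single-character splitter (specification of str.split('1'))
def split1 (d : Char) : List Char → List (List Char)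
  | [] => [[]]
  | c :: t => if c = d then [] :: split1 d t else (split1 d t).modifyHead (c :: ·)

theorem split1_cons_ex (d : Char) (l : List Char) : ∃ x xs, split1 d l = x :: xs := by
  induction l with
  | nil => exact ⟨[], [], rfl⟩
  | cons c t ih =>
      obtain ⟨x, xs, hx⟩ := ih
      by_cases hc : c = d
      · exact ⟨[], split1 d t, by simp [split1, hc]⟩
      · exact ⟨c :: x, xs, by simp [split1, hc, hx, List.modifyHead]⟩

-- splitOn.go with a one-character separator computes split1 onto its accumulators
theorem splitOn_go_char (d : Char) (l : List Char) :
    ∀ (fuel : Nat) (cur : List Char) (acc : List (List Char)), l.length < fuel →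
    PySem.Chars.splitOn.go [d] fuel l cur acc
      = acc.reverse ++ (split1 d l).modifyHead (cur.reverse ++ ·) := by
  induction l with
  | nil =>
      intro fuel cur acc _
      cases fuel <;> simp [PySem.Chars.splitOn.go, split1, List.modifyHead]
  | cons c t ih =>
      intro fuel cur acc hf
      cases fuel with
      | zero => omega
      | succ f =>
          have hft : t.length < f := by simpa using Nat.lt_of_succ_lt_succ hf
          rw [PySem.Chars.splitOn.go]
          by_cases hc : c = d
          · rw [if_pos (by simp [List.isPrefixOf, hc])]
            rw [show List.drop [d].length (c :: t) = t by simp]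
            rw [ih f [] (cur.reverse :: acc) hft]
            obtain ⟨x, xs, hx⟩ := split1_cons_ex d t
            simp [split1, hc, hx, List.modifyHead]
          · rw [if_neg (by simp [List.isPrefixOf]; exact fun h => hc h.symm)]
            rw [ih f (c :: cur) acc hft]
            obtain ⟨x, xs, hx⟩ := split1_cons_ex d t
            simp [split1, hc, hx, List.modifyHead]

theorem splitOn_char (d : Char) (l : List Char) :
    PySem.Chars.splitOn l [d] = split1 d l := by
  rw [PySem.Chars.splitOn, splitOn_go_char d l (l.length + 1) [] [] (by omega)]
  obtain ⟨x, xs, hx⟩ := split1_cons_ex d l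
  simp [hx, List.modifyHead]

-- join helpers on the '#' separator
theorem join_cons₂ (x y : List Char) (zs : List (List Char)) :
    PySem.Chars.join ['#'] (x :: y :: zs) = x ++ '#' :: PySem.Chars.join ['#'] (y :: zs) := by
  simp [PySem.Chars.join, List.intercalate, List.intersperse_cons₂]

theorem join_single (x : List Char) : PySem.Chars.join ['#'] [x] = x := by
  simp [PySem.Chars.join, List.intercalate]

theorem join_cons_head (a : Char) (u : List Char) (vs : List (List Char)) :
    PySem.Chars.join ['#'] ((a :: u) :: vs) = a :: PySem.Chars.join ['#'] (u :: vs) := by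
  cases vs with
  | nil => rw [join_single, join_single]
  | cons y ys => rw [join_cons₂, join_cons₂]; rfl

-- joining the blanked-out runs of split1 '1' with '#' is exactly the per-character map
theorem join_split1_eq_map (l : List Char) :
    PySem.Chars.join ['#'] ((split1 '1' l).map (fun run => List.replicate run.length ' '))
      = l.map (fun s => if s = '1' then '#' else ' ') := by
  induction l with
  | nil => simp [split1, PySem.Chars.join, List.intercalate]
  | cons c t ih =>
      obtain ⟨x, xs, hx⟩ := split1_cons_ex '1' t
      by_cases hc : c = '1'
      · have ih' : PySem.Chars.join ['#']
            (List.replicate x.length ' ' :: xs.map (fun run => List.replicate run.length ' '))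
            = t.map (fun s => if s = '1' then '#' else ' ') := by simpa [hx] using ih
        simp only [split1, if_pos hc, List.map_cons, hx, List.length_nil, List.replicate_zero]
        rw [join_cons₂, ih']
        simp
      · have ih' : PySem.Chars.join ['#']
            (List.replicate x.length ' ' :: xs.map (fun run => List.replicate run.length ' '))
            = t.map (fun s => if s = '1' then '#' else ' ') := by simpa [hx] using ih
        simp only [split1, if_neg hc, hx, List.modifyHead, List.map_cons, List.length_cons,
          List.replicate_succ, join_cons_head]
        rw [ih']

theorem binCore_ne_nil (k : Nat) (hk : k ≠ 0) : binCore k ≠ [] := by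
  rw [binCore]; simp [hk]

-- every character of binCore is a binary digit
theorem binCore_digits (k : Nat) : ∀ ch ∈ binCore k, ch = '0' ∨ ch = '1' := by
  induction k using Nat.strong_induction_on with
  | _ k ih =>
      intro ch hch
      rw [binCore] at hch
      by_cases hk : k = 0
      · simp [hk] at hch
      · rw [dif_neg hk] at hch
        rcases List.mem_append.mp hch with h | h
        · exact ih (k / 2) (Nat.div_lt_self (Nat.pos_of_ne_zero hk) one_lt_two) ch h
        · rcases List.mem_singleton.mp h with rfl
          split_ifs <;> simp

theorem pyBinDrop2_ne_nil (m : Int) : pyBinDrop2 m ≠ [] := by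
  rw [pyBinDrop2]
  split_ifs with h1 h2
  · simp
  · simp
  · exact binCore_ne_nil m.natAbs (by omega)

theorem pyBinDrop2_head_not_sign (m : Int) (c : Char) (rest : List Char)
    (h : pyBinDrop2 m = c :: rest) : ¬ (c = '+' ∨ c = '-') := by
  rw [pyBinDrop2] at h
  split_ifs at h with h1 h2
  · cases h; decide
  · cases h; decide
  · have := binCore_digits m.natAbs c (by rw [h]; simp)
    rcases this with rfl | rfl <;> decide

-- zfill = A's manual zero padding (bin(m)[2:] never starts with a sign)
theorem zfill_eq_pad (n : Int) (m : Int) :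
    PySem.Chars.zfill (pyBinDrop2 m) n
      = List.replicate (n - ((pyBinDrop2 m).length : Int)).toNat '0' ++ pyBinDrop2 m := by
  rw [PySem.Chars.zfill.eq_def]
  by_cases hle : n ≤ ((pyBinDrop2 m).length : Int)
  · rw [if_pos hle]
    have : (n - ((pyBinDrop2 m).length : Int)).toNat = 0 := by omega
    simp [this]
  · rw [if_neg hle]
    cases ht : pyBinDrop2 m with
    | nil => exact absurd ht (pyBinDrop2_ne_nil m)
    | cons c rest =>
        have hlen : (n - (((c :: rest) : List Char).length : Int)).toNat
            = n.toNat - ((c :: rest) : List Char).length := by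
          simp only [List.length_cons] at hle ⊢
          omega
        show (if c = '+' ∨ c = '-' then c :: (List.replicate (n.toNat - (c :: rest).length) '0' ++ rest)
              else List.replicate (n.toNat - (c :: rest).length) '0' ++ c :: rest)
            = List.replicate (n - (((c :: rest) : List Char).length : Int)).toNat '0' ++ c :: rest
        rw [if_neg (pyBinDrop2_head_not_sign m c rest ht), hlen]

-- equality of one row
theorem row_eq (n m : Int) :
    String.mk ((List.replicate (n - ((pyBinDrop2 m).length : Int)).toNat '0'
        ++ pyBinDrop2 m).foldl (fun acc s => acc ++ [if s = '1' then '#' else ' ']) [])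
      = String.ofList (PySem.Chars.join ['#']
          ((PySem.Chars.splitOn (PySem.Chars.zfill (pyBinDrop2 m) n) ['1']).map
            (fun run => List.replicate run.length ' '))) := by
  rw [foldl_push_eq_map, zfill_eq_pad, splitOn_char, join_split1_eq_map]
  rfl

-- ===== VERDICT =====
theorem solution_spec : Claim_equal_solution := by
  intro n arr1 arr2 _
  unfold Spec_solution solution solution_alt
  induction arr1.zip arr2 using List.reverseRecOn with
  | nil => rfl
  | append_singleton l p ih =>
      rw [List.foldl_append, List.foldl_append, ih]
      simp only [List.foldl_cons, List.foldl_nil]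
      rw [row_eq n (Int.lor p.1 p.2)]
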